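-- pv_equiv track=rewrite | github.com/Misheck-bot/timetabling-software | algorithms/simulated_annealing.py | _check_student_conflicts
-- ===== SOURCE A (Python) =====
-- from typing import List, Dict, Tuple, Any
--
-- def _check_student_conflicts(timetable: Dict) -> int:
--     """Check if any student has conflicting exam times"""
--     violations = 0
--
--     # Group assignments by time slot
--     time_groups = {}
--     for assignment in timetable['assignments']:
--         time_key = (assignment['day'], assignment['start_time'])
--         if time_key not in time_groups:
--             time_groups[time_key] = []
--         time_groups[time_key].append(assignment)
--
--     # Check for conflicts in each time slot
--     for time_key, assignments in time_groups.items():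
--         if len(assignments) > 1:
--             violations += len(assignments) - 1
--
--     return violations
-- ===== SOURCE B (Python) =====
-- def _check_student_conflicts(timetable):
--     """Check if any student has conflicting exam times"""
--     total = 0
--     seen = set()
--     for assignment in timetable['assignments']:
--         seen.add((assignment['day'], assignment['start_time']))
--         total += 1
--     return total - len(seen)
-- ===== Notes on version B (the rewrite author's own statement) =====
-- stated objective: simpler
-- what changed: Replaces the group-by-time-slot dict and the second aggregation loop with a single pass keeping a running total and a set of distinct (day, start_time) keys, returning total minus the number of distinct keys.
import Mathlib
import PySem

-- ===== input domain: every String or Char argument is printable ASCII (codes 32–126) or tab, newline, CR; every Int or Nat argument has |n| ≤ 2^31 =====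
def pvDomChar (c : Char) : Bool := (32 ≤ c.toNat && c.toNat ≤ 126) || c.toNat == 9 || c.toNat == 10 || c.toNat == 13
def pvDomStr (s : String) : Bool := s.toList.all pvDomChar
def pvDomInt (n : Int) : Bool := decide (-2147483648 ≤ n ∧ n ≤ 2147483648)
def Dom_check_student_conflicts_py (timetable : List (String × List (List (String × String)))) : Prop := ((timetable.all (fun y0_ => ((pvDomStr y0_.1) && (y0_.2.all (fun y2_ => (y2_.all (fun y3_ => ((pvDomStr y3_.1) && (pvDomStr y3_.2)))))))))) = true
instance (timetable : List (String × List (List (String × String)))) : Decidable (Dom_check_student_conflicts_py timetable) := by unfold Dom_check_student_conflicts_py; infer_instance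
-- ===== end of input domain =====

-- B replaces A's group-by-time-slot dict plus second aggregation loop with a single pass
-- (running total and set of distinct time keys), returning total - number of distinct keys.

-- shared helper: the time key (assignment['day'], assignment['start_time']) both Pythons compute
def pvTimeKey (assignment : List (String × String)) : String × String :=
  ((PySem.Dict.mk assignment).getD "day" "", (PySem.Dict.mk assignment).getD "start_time" "")

-- ===== PORT A =====
def check_student_conflicts_py (timetable : List (String × List (List (String × String)))) : Int :=
  let asgs := (PySem.Dict.mk timetable).getD "assignments" []
  -- for assignment in timetable['assignments']: group by time_key
  let time_groups := asgs.foldl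
    (fun d assignment =>
      let k := pvTimeKey assignment
      let d := if d.contains k then d else d.insert k []   -- if time_key not in time_groups: … = []
      d.insert k (d.getD k [] ++ [assignment]))            -- time_groups[time_key].append(assignment)
    PySem.Dict.empty
  -- for time_key, assignments in time_groups.items(): …
  time_groups.items.foldl
    (fun violations p =>
      if p.2.length > 1 then violations + ((p.2.length : Int) - 1) else violations) 0

-- ===== PORT B =====
def check_student_conflicts_py_alt (timetable : List (String × List (List (String × String)))) : Int :=
  let asgs := (PySem.Dict.mk timetable).getD "assignments" []
  let st := asgs.foldl
    (fun (s : Int × PySem.Set (String × String)) assignment =>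
      (s.1 + 1, PySem.Set.add s.2 (pvTimeKey assignment)))
    ((0 : Int), PySem.Set.empty)
  st.1 - PySem.Set.len st.2

-- ===== PRECONDITION & SPEC =====
-- Pre_ excludes exactly the inputs where the Python A raises KeyError: a timetable with no
-- 'assignments' key, or an assignment missing 'day' or 'start_time'.
def Pre_check_student_conflicts_py (timetable : List (String × List (List (String × String)))) : Prop :=
  (PySem.Dict.mk timetable).contains "assignments" = true ∧
  ((PySem.Dict.mk timetable).getD "assignments" []).all
    (fun a => (PySem.Dict.mk a).contains "day" && (PySem.Dict.mk a).contains "start_time") = true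
instance (timetable : List (String × List (List (String × String)))) : Decidable (Pre_check_student_conflicts_py timetable) := by unfold Pre_check_student_conflicts_py; infer_instance

def pvWitness_check_student_conflicts_py : (List (String × List (List (String × String)))) :=
  [("assignments", [[("day", "Mon"), ("start_time", "08:00")], [("day", "Mon"), ("start_time", "08:00")]])]

def Spec_check_student_conflicts_py (timetable : List (String × List (List (String × String)))) (out : Int) : Prop := out = check_student_conflicts_py_alt timetable
instance (timetable : List (String × List (List (String × String)))) (out : Int) : Decidable (Spec_check_student_conflicts_py timetable out) := by unfold Spec_check_student_conflicts_py; infer_instance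

-- ===== CLAIM (what is proved, stated in full; the proofs are below) =====
def Claim_equal_check_student_conflicts_py : Prop := ∀ (timetable : List (String × List (List (String × String)))), Dom_check_student_conflicts_py timetable → Pre_check_student_conflicts_py timetable → Spec_check_student_conflicts_py timetable (check_student_conflicts_py timetable)

-- ===== LEMMAS AND PROOFS =====

-- A's loop body, named for the proofs
def pvStep (d : PySem.Dict (String × String) (List (List (String × String))))
    (assignment : List (String × String)) : PySem.Dict (String × String) (List (List (String × String))) :=
  let k := pvTimeKey assignment
  let d := if d.contains k then d else d.insert k []
  d.insert k (d.getD k [] ++ [assignment])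

lemma pvStep_keys (d : PySem.Dict (String × String) (List (List (String × String))))
    (a : List (String × String)) :
    (pvStep d a).keys = PySem.Set.add d.keys (pvTimeKey a) := by
  unfold pvStep
  by_cases hc : d.contains (pvTimeKey a) = true
  · simp only [hc, if_true]
    rw [PySem.Dict.keys_insert_of_contains _ _ hc,
        PySem.Set.add_of_mem ((PySem.Dict.contains_iff_mem_keys _ _).mp hc)]
  · simp only [hc, Bool.false_eq_true, if_false]
    rw [PySem.Dict.keys_insert_of_contains _ _ (PySem.Dict.contains_insert_self _ _ _),
        PySem.Dict.keys_insert_of_not_contains _ _ (by simpa using hc),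
        PySem.Set.add_of_not_mem (fun hm => hc ((PySem.Dict.contains_iff_mem_keys _ _).mpr hm))]

lemma pvStep_nodup (d : PySem.Dict (String × String) (List (List (String × String))))
    (a : List (String × String)) (hnd : d.keys.Nodup) : (pvStep d a).keys.Nodup := by
  unfold pvStep
  by_cases hc : d.contains (pvTimeKey a) = true
  · simp only [hc, if_true]; exact PySem.Dict.nodup_keys_insert _ _ _ hnd
  · simp only [hc, Bool.false_eq_true, if_false]
    exact PySem.Dict.nodup_keys_insert _ _ _ (PySem.Dict.nodup_keys_insert _ _ _ hnd)

lemma pvStep_getD (d : PySem.Dict (String × String) (List (List (String × String))))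
    (a : List (String × String)) (c : String × String) :
    (pvStep d a).getD c [] = d.getD c [] ++ (if pvTimeKey a == c then [a] else []) := by
  unfold pvStep
  have hk' : ∀ (h : ¬ c = pvTimeKey a), ¬ pvTimeKey a = c := fun h he => h he.symm
  by_cases hc : d.contains (pvTimeKey a) = true
  · simp only [hc, if_true]
    rw [PySem.Dict.getD_insert]
    by_cases hk : c = pvTimeKey a
    · simp [hk]
    · simp [hk, hk' hk]
  · simp only [hc, Bool.false_eq_true, if_false]
    rw [PySem.Dict.getD_insert]
    by_cases hk : c = pvTimeKey a
    · simp [hk, PySem.Dict.getD_insert_self,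
        PySem.Dict.getD_of_not_contains _ _ (by simpa using hc)]
    · rw [PySem.Dict.getD_insert, PySem.Dict.getD_insert]
      simp [hk, hk' hk]

lemma pv_fold_inv (asgs : List (List (String × String))) :
    ∀ (d : PySem.Dict (String × String) (List (List (String × String)))), d.keys.Nodup →
      (asgs.foldl pvStep d).keys = PySem.Set.update d.keys (asgs.map pvTimeKey)
      ∧ (asgs.foldl pvStep d).keys.Nodup
      ∧ ∀ c, (asgs.foldl pvStep d).getD c [] =
          d.getD c [] ++ asgs.filter (fun a => pvTimeKey a == c) := by
  induction asgs with
  | nil => intro d hnd; refine ⟨by simp [PySem.Set.update], hnd, by simp⟩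
  | cons a rest ih =>
    intro d hnd
    obtain ⟨h1, h2, h3⟩ := ih (pvStep d a) (pvStep_nodup d a hnd)
    refine ⟨?_, by simpa using h2, ?_⟩
    · simp only [List.foldl_cons, List.map_cons]
      rw [h1, pvStep_keys, PySem.Set.update_cons]
    · intro c
      simp only [List.foldl_cons, List.filter_cons]
      rw [h3 c, pvStep_getD]
      by_cases hk : pvTimeKey a == c <;> simp [hk]

lemma pv_foldl_violations (l : List ((String × String) × List (List (String × String))))
    (h : ∀ p ∈ l, 1 ≤ p.2.length) (init : Int) :
    l.foldl (fun violations p =>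
        if p.2.length > 1 then violations + ((p.2.length : Int) - 1) else violations) init
      = init + (l.map (fun p => (p.2.length : Int) - 1)).sum := by
  induction l generalizing init with
  | nil => simp
  | cons p rest ih =>
    have hp := h p (List.mem_cons_self)
    have hr : ∀ q ∈ rest, 1 ≤ q.2.length := fun q hq => h q (List.mem_cons_of_mem _ hq)
    simp only [List.foldl_cons, List.map_cons, List.sum_cons]
    rw [ih hr]
    by_cases h1 : p.2.length > 1
    · simp only [h1, if_true]; ring
    · have : p.2.length = 1 := by omega
      simp [this]

lemma pv_sum_sub_one {K : Type} (s : List K) (f : K → Int) :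
    (s.map (fun k => f k - 1)).sum = (s.map f).sum - (s.length : Int) := by
  induction s with
  | nil => simp
  | cons x xs ih => simp only [List.map_cons, List.sum_cons, List.length_cons, ih]; push_cast; ring

lemma pv_count_sum_nat (s : List (String × String)) :
    ∀ (m : List (String × String)), s.Nodup → (∀ x, x ∈ s ↔ x ∈ m) →
      (s.map (fun k => m.count k)).sum = m.length := by
  induction s with
  | nil =>
    intro m _ hmem
    cases m with
    | nil => simp
    | cons y ys => exact absurd ((hmem y).mpr (by simp)) (by simp)
  | cons k s' ih =>
    intro m hnd hmem
    obtain ⟨hk, hnd'⟩ := List.nodup_cons.mp hnd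
    set m' := m.filter (fun x => !(x == k)) with hm'
    have hsplit : m.length = m.count k + m'.length := by
      rw [hm', List.count_eq_countP, ← List.countP_eq_length_filter,
          List.length_eq_countP_add_countP (fun x => x == k)]
      congr 1
      apply List.countP_congr
      intro x _
      by_cases h : x = k <;> simp [h]
    have hcount' : ∀ j ∈ s', m.count j = m'.count j := by
      intro j hj
      have hjk : ¬ j = k := fun h => hk (h ▸ hj)
      rw [hm', List.count_filter (by simp [hjk])]
    have hmem' : ∀ x, x ∈ s' ↔ x ∈ m' := by
      intro x
      rw [hm', List.mem_filter]
      constructor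
      · intro hx
        have hxk : ¬ x = k := fun h => hk (h ▸ hx)
        exact ⟨(hmem x).mp (List.mem_cons_of_mem _ hx), by simp [hxk]⟩
      · rintro ⟨hx, hxk⟩
        rcases List.mem_cons.mp ((hmem x).mpr hx) with h | h
        · exact absurd h (by simpa using hxk)
        · exact h
    have hmapc : s'.map (fun j => m.count j) = s'.map (fun j => m'.count j) :=
      List.map_congr_left hcount'
    simp only [List.map_cons, List.sum_cons, hmapc, ih m' hnd' hmem']
    omega

lemma pv_count_sum (m : List (String × String)) (s : List (String × String))
    (hnd : s.Nodup) (hmem : ∀ x, x ∈ s ↔ x ∈ m) :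
    (s.map (fun k => (m.count k : Int))).sum = (m.length : Int) := by
  have h := pv_count_sum_nat s m hnd hmem
  have : (s.map (fun k => (m.count k : Int))) = (s.map (fun k => m.count k)).map (Nat.cast) := by
    rw [List.map_map]; rfl
  rw [this, ← Nat.cast_list_sum, h]

lemma pv_foldl_count (l : List (List (String × String))) (i : Int) :
    l.foldl (fun t _ => t + 1) i = i + (l.length : Int) := by
  induction l generalizing i with
  | nil => simp
  | cons x xs ih => simp only [List.foldl_cons, List.length_cons, ih]; push_cast; ring

lemma pvA_eq (timetable : List (String × List (List (String × String)))) :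
    check_student_conflicts_py timetable =
      ((((PySem.Dict.mk timetable).getD "assignments" []).foldl pvStep PySem.Dict.empty).items.foldl
        (fun violations p =>
          if p.2.length > 1 then violations + ((p.2.length : Int) - 1) else violations) 0) := rfl

lemma pvB_eq (timetable : List (String × List (List (String × String)))) :
    check_student_conflicts_py_alt timetable =
      ((((PySem.Dict.mk timetable).getD "assignments" []).foldl
          (fun (s : Int × PySem.Set (String × String)) a =>
            (s.1 + 1, PySem.Set.add s.2 (pvTimeKey a))) ((0 : Int), PySem.Set.empty)).1
        - PySem.Set.len ((((PySem.Dict.mk timetable).getD "assignments" []).foldl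
          (fun (s : Int × PySem.Set (String × String)) a =>
            (s.1 + 1, PySem.Set.add s.2 (pvTimeKey a))) ((0 : Int), PySem.Set.empty)).2)) := rfl

-- ===== VERDICT (by name: the statement is the Claim_ definition above) =====
theorem check_student_conflicts_py_spec : Claim_equal_check_student_conflicts_py := by
  intro timetable _ _
  unfold Spec_check_student_conflicts_py
  rw [pvA_eq, pvB_eq]
  set asgs := (PySem.Dict.mk timetable).getD "assignments" [] with hasgs
  set m := asgs.map pvTimeKey with hm
  obtain ⟨hkeys, hnd, hgetD⟩ :=
    pv_fold_inv asgs PySem.Dict.empty (by simp [PySem.Dict.keys_empty])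
  set G := asgs.foldl pvStep PySem.Dict.empty with hG
  have hkeys' : G.keys = PySem.Set.ofList m := by
    rw [hkeys, hm]; simp [PySem.Dict.keys_empty, PySem.Set.update_nil_left]
  have hlen : ∀ c ∈ G.keys, (G.getD c []).length = m.count c := by
    intro c _
    rw [hgetD c]
    simp only [PySem.Dict.getD_empty, List.nil_append]
    rw [← List.countP_eq_length_filter, hm, List.count_eq_countP, List.countP_map]
    rfl
  have hitems : G.items = G.keys.map (fun k => (k, G.getD k [])) :=
    PySem.Dict.items_eq_map_keys G hnd []
  have hpos : ∀ p ∈ G.items, 1 ≤ p.2.length := by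
    intro p hp
    rw [hitems] at hp
    obtain ⟨k, hk, rfl⟩ := List.mem_map.mp hp
    rw [hlen k hk]
    have hmem : k ∈ m := (PySem.Set.mem_ofList _ _).mp (hkeys' ▸ hk)
    have := List.count_pos_iff.mpr hmem
    omega
  -- A's side
  rw [pv_foldl_violations G.items hpos 0, hitems, List.map_map]
  have hmap : ((fun p : (String × String) × List (List (String × String)) =>
      (p.2.length : Int) - 1) ∘ fun k => (k, G.getD k []))
      = fun k => ((G.getD k []).length : Int) - 1 := rfl
  rw [hmap]
  have hcongr : (G.keys.map (fun k => ((G.getD k []).length : Int) - 1)).sum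
      = (G.keys.map (fun k => (m.count k : Int) - 1)).sum := by
    apply congrArg
    apply List.map_congr_left
    intro k hk; rw [hlen k hk]
  rw [hcongr, pv_sum_sub_one, pv_count_sum m G.keys hnd
      (by intro x; rw [hkeys']; exact PySem.Set.mem_ofList _ _)]
  -- B's side
  rw [PySem.List.foldl_prod_mk (f := fun (t : Int) _ => t + 1)
      (g := fun s a => PySem.Set.add s (pvTimeKey a))]
  rw [pv_foldl_count, ← PySem.Set.update_map_eq_foldl_add, ← hm,
      show (PySem.Set.empty : PySem.Set (String × String)) = [] from rfl,
      PySem.Set.update_nil_left, ← hkeys']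
  have hml : m.length = asgs.length := by rw [hm, List.length_map]
  simp only [PySem.Set.len]
  rw [hml]
  ring
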